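-- pv_equiv track=rewrite | github.com/sonic-net/sonic-mgmt | spytest/utilities/common.py | parse_hyphon_name_value
-- ===== SOURCE A (Python) =====
-- def parse_hyphon_name_value(s):
--     name, val, rv = None, [], {}
--     for w in s.split():
--         if w[:1] != "-":
--             val.append(w)
--         else:
--             if name: rv[name] = " ".join(val)
--             name, val = w, []
--     if name: rv[name] = " ".join(val)
--     return rv
-- ===== SOURCE B (Python) =====
-- def parse_hyphon_name_value(s):
--     words = s.split()
--     marks = [(i, w) for i, w in enumerate(words) if w[:1] == "-"]
--     bounds = [i for i, _ in marks[1:]] + [len(words)]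
--     rv = {}
--     for (i, w), end in zip(marks, bounds):
--         rv[w] = " ".join(words[i + 1:end])
--     return rv
-- ===== Notes on version B (the rewrite author's own statement) =====
-- stated objective: alternative
-- what changed: Replaces A's streaming pending-buffer scan (accumulate value words, flush into the dict at each name boundary) with a staged index-based algorithm: first compute the positions of all '-'-prefixed tokens via enumerate+filter, then for each name slice the word list between its position and the next name's position and join that slice; there is no running accumulator at all.
import Mathlib
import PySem

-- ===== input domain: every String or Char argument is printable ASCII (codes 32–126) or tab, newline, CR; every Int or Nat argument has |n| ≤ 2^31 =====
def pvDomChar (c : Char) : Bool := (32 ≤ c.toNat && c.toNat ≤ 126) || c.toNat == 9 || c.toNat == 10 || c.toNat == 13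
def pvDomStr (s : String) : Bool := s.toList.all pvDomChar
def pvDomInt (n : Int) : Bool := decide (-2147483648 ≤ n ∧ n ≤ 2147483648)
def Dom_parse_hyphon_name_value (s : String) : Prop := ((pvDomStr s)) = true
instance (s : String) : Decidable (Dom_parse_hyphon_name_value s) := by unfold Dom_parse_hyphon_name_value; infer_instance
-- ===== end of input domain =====

-- B replaces A's streaming flush-at-boundary scan with a staged index-based algorithm (find all
-- name positions, then slice the word list between consecutive positions); objective: alternative.

-- ===== PORT A =====
-- loop body of A; state = (name, val, rv).  'if name:' is exact as a match on the Option, since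
-- name only ever holds a token starting with "-", hence a nonempty (truthy) string.
def pvStepA (st : Option String × List String × PySem.Dict String String) (w : String) :
    Option String × List String × PySem.Dict String String :=
  if PySem.Str.slice w none (some 1) ≠ "-" then
    (st.1, st.2.1 ++ [w], st.2.2)
  else
    match st.1 with
    | some n => (some w, [], st.2.2.insert n (PySem.Str.join " " st.2.1))
    | none   => (some w, [], st.2.2)

def parse_hyphon_name_value (s : String) : List (String × String) :=
  let st := (PySem.Str.split₀ s).foldl pvStepA (none, [], PySem.Dict.empty)
  (match st.1 with
   | some n => st.2.2.insert n (PySem.Str.join " " st.2.1)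
   | none   => st.2.2).items

-- ===== PORT B =====
-- w[:1] == "-"
def pvMark (w : String) : Bool := PySem.Str.slice w none (some 1) == "-"

def parse_hyphon_name_value_alt (s : String) : List (String × String) :=
  let words := PySem.Str.split₀ s
  let marks := (PySem.List.enumerate words).filter (fun p => pvMark p.2)
  let bounds := (marks.drop 1).map (·.1) ++ [(words.length : Int)]
  ((marks.zip bounds).foldl
    (fun d q => d.insert q.1.2
      (PySem.Str.join " " (PySem.List.slice words (some (q.1.1 + 1)) (some q.2))))
    PySem.Dict.empty).items

-- ===== PRECONDITION & SPEC =====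
def Spec_parse_hyphon_name_value (s : String) (out : List (String × String)) : Prop := out = parse_hyphon_name_value_alt s
instance (s : String) (out : List (String × String)) : Decidable (Spec_parse_hyphon_name_value s out) := by unfold Spec_parse_hyphon_name_value; infer_instance

-- ===== CLAIM (what is proved, stated in full; the proofs are below) =====
def Claim_equal_parse_hyphon_name_value : Prop := ∀ (s : String), Dom_parse_hyphon_name_value s → Spec_parse_hyphon_name_value s (parse_hyphon_name_value s)

-- ===== LEMMAS AND PROOFS =====

-- the common characterization: the (name, value-words) segments of a word list
def pvSegs (ws : List String) : List (String × List String) :=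
  match ws with
  | [] => []
  | w :: t =>
      if pvMark w then
        (w, t.takeWhile (fun x => !pvMark x)) :: pvSegs (t.dropWhile (fun x => !pvMark x))
      else pvSegs t
termination_by ws.length
decreasing_by
  · have := List.length_dropWhile_le (fun x => !pvMark x) t
    simpa using Nat.lt_succ_of_le this
  · simp

def pvIns (d : PySem.Dict String String) (p : String × List String) : PySem.Dict String String :=
  d.insert p.1 (PySem.Str.join " " p.2)

-- A's "flush the pending buffer" finish
def pvFinA (st : Option String × List String × PySem.Dict String String) : PySem.Dict String String :=
  match st.1 with
  | some n => st.2.2.insert n (PySem.Str.join " " st.2.1)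
  | none   => st.2.2

-- shift a slice across a cons
theorem pvSliceCons (w : String) (t : List String) (a b : Int) (ha : 1 ≤ a) (hb : 1 ≤ b) :
    PySem.List.slice (w :: t) (some a) (some b) = PySem.List.slice t (some (a - 1)) (some (b - 1)) := by
  rw [PySem.List.slice_toNat _ (by omega) (by omega), PySem.List.slice_toNat _ (by omega) (by omega)]
  obtain ⟨m, hm⟩ : ∃ m, a.toNat = m + 1 := ⟨a.toNat - 1, by omega⟩
  rw [hm, List.drop_succ_cons]
  have h1 : (a - 1).toNat = m := by omega
  have h2 : (b - 1).toNat = b.toNat - 1 := by omega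
  rw [h1, h2]
  congr 1
  omega

-- every index produced by enumerate-from-k is ≥ k
theorem pvGE (t : List String) (k : Int) (p : Int × String)
    (hp : p ∈ (PySem.List.enumerate t k).filter (fun q => pvMark q.2)) : k ≤ p.1 := by
  have := List.mem_filter.mp hp |>.1
  rw [PySem.List.mem_enumerate_iff] at this
  obtain ⟨j, hj, rfl⟩ := this
  simp

theorem pvSegs_dropWhile (t : List String) :
    pvSegs (t.dropWhile (fun x => !pvMark x)) = pvSegs t := by
  induction t with
  | nil => simp
  | cons x r ih =>
      by_cases hx : pvMark x
      · simp [hx]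
      · rw [List.dropWhile_cons]
        simp only [hx, Bool.not_false, if_true]
        rw [ih]
        conv_rhs => rw [pvSegs.eq_def]
        simp [hx]

-- the first mark position determines the takeWhile prefix
theorem pvFirst (t : List String) (k : Int) :
    t.take (((((PySem.List.enumerate t k).filter (fun q => pvMark q.2)).headD (k + t.length, "")).1 - k).toNat)
      = t.takeWhile (fun x => !pvMark x) := by
  induction t generalizing k with
  | nil => simp
  | cons x r ih =>
      rw [PySem.List.enumerate_cons, List.filter_cons]
      by_cases hx : pvMark x
      · simp [hx]
      · simp only [hx, Bool.false_eq_true, not_false_iff, if_neg, List.takeWhile_cons, Bool.not_false, if_true]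
        cases h : ((PySem.List.enumerate r (k+1)).filter (fun q => pvMark q.2)) with
        | nil =>
            have hall : r.takeWhile (fun x => !pvMark x) = r := by
              rw [List.takeWhile_eq_self_iff]
              intro y hy
              have : (k + 1 + (r.idxOf y : Int), y) ∈ PySem.List.enumerate r (k+1) := by
                rw [PySem.List.mem_enumerate_iff]
                exact ⟨r.idxOf y, List.idxOf_lt_length_of_mem hy, by simp [List.getElem_idxOf (List.idxOf_lt_length_of_mem hy)]⟩
              have := List.filter_eq_nil_iff.mp h _ this
              simpa using this
            simp only [h, List.headD_nil]
            have : ((k + ((x :: r).length : Int)) - k).toNat = r.length + 1 := by simp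
            rw [this, hall, List.take_succ_cons, List.take_of_length_le (le_refl _)]
        | cons p ps =>
            have hge : k + 1 ≤ p.1 := pvGE r (k+1) p (by rw [h]; exact List.mem_cons_self ..)
            have ihr := ih (k+1)
            rw [h] at ihr
            simp only [List.headD_cons] at ihr ⊢
            have : (p.1 - k).toNat = (p.1 - (k+1)).toNat + 1 := by omega
            rw [this, List.take_succ_cons, ihr]

-- A-side: fold with an active name
theorem pvLA2 (ws : List String) (n : String) (val : List String) (rv : PySem.Dict String String) :
    pvFinA (ws.foldl pvStepA (some n, val, rv))
      = (pvSegs (ws.dropWhile (fun x => !pvMark x))).foldl pvIns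
          (rv.insert n (PySem.Str.join " " (val ++ ws.takeWhile (fun x => !pvMark x)))) := by
  induction ws generalizing n val rv with
  | nil => rw [pvSegs.eq_def]; simp [pvFinA]
  | cons w t ih =>
      by_cases hw : pvMark w
      · have hs : PySem.Str.slice w none (some 1) = "-" := by simpa [pvMark] using hw
        rw [List.foldl_cons, show pvStepA (some n, val, rv) w
              = (some w, [], rv.insert n (PySem.Str.join " " val)) from by simp [pvStepA, hs]]
        rw [ih]
        rw [List.dropWhile_cons, List.takeWhile_cons]
        simp only [hw, Bool.not_true, if_neg, Bool.false_eq_true, not_false_iff]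
        conv_rhs => rw [pvSegs.eq_def]
        simp [hw, pvIns]
      · have hs : PySem.Str.slice w none (some 1) ≠ "-" := by simpa [pvMark] using hw
        rw [List.foldl_cons, show pvStepA (some n, val, rv) w
              = (some n, val ++ [w], rv) from by simp [pvStepA, hs]]
        rw [ih]
        rw [List.dropWhile_cons, List.takeWhile_cons]
        simp [hw, List.append_assoc]

-- A-side: fold with no active name
theorem pvLA1 (ws : List String) (val : List String) (rv : PySem.Dict String String) :
    pvFinA (ws.foldl pvStepA (none, val, rv)) = (pvSegs ws).foldl pvIns rv := by
  induction ws generalizing val rv with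
  | nil => rw [pvSegs.eq_def]; simp [pvFinA]
  | cons w t ih =>
      by_cases hw : pvMark w
      · have hs : PySem.Str.slice w none (some 1) = "-" := by simpa [pvMark] using hw
        rw [List.foldl_cons, show pvStepA (none, val, rv) w = (some w, [], rv) from by simp [pvStepA, hs]]
        rw [pvLA2]
        conv_rhs => rw [pvSegs.eq_def]
        simp [hw, pvIns]
      · have hs : PySem.Str.slice w none (some 1) ≠ "-" := by simpa [pvMark] using hw
        rw [List.foldl_cons, show pvStepA (none, val, rv) w = (none, val ++ [w], rv) from by simp [pvStepA, hs]]
        rw [ih]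
        conv_rhs => rw [pvSegs.eq_def]
        simp [hw]

-- shift the per-element slices across a cons, for a zip built from marks of t at start k+1
theorem pvShift (t : List String) (w : String) (k : Int)
    (bs : List Int) (hbs : ∀ e ∈ bs, k + 1 ≤ e) :
    ((((PySem.List.enumerate t (k+1)).filter (fun p => pvMark p.2)).zip bs).map
        (fun q => (q.1.2, PySem.List.slice (w :: t) (some (q.1.1 + 1 - k)) (some (q.2 - k)))))
      = ((((PySem.List.enumerate t (k+1)).filter (fun p => pvMark p.2)).zip bs).map
        (fun q => (q.1.2, PySem.List.slice t (some (q.1.1 + 1 - (k+1))) (some (q.2 - (k+1)))))) := by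
  apply List.map_congr_left
  intro q hq
  obtain ⟨h1, h2⟩ := List.of_mem_zip hq
  have hi : k + 1 ≤ q.1.1 := pvGE t (k+1) q.1 h1
  have he : k + 1 ≤ q.2 := hbs _ h2
  rw [pvSliceCons w t _ _ (by omega) (by omega)]
  congr 2 <;> ring

theorem pvBoundsGE (t : List String) (k : Int) (e : Int)
    (he : e ∈ ((((PySem.List.enumerate t (k+1)).filter (fun p => pvMark p.2)).drop 1).map (·.1)
                ++ [(k+1) + (t.length : Int)])) : k + 1 ≤ e := by
  rcases List.mem_append.mp he with h | h
  · obtain ⟨p, hp, rfl⟩ := List.mem_map.mp h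
    exact pvGE t (k+1) p (List.mem_of_mem_drop hp)
  · simp at h
    omega

theorem pvNoMark (t : List String) (k : Int)
    (h : (PySem.List.enumerate t k).filter (fun p => pvMark p.2) = []) :
    t.takeWhile (fun x => !pvMark x) = t := by
  have := pvFirst t k
  rw [h] at this
  simp at this
  exact this.symm

-- B-side: the zip-of-marks slicing produces exactly the segments
theorem pvLB (ws : List String) (k : Int) (hk : 0 ≤ k) :
    (((PySem.List.enumerate ws k).filter (fun p => pvMark p.2)).zip
        ((((PySem.List.enumerate ws k).filter (fun p => pvMark p.2)).drop 1).map (·.1) ++ [k + ws.length])).map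
      (fun q => (q.1.2, PySem.List.slice ws (some (q.1.1 + 1 - k)) (some (q.2 - k))))
      = pvSegs ws := by
  induction ws generalizing k with
  | nil => rw [pvSegs.eq_def]; simp
  | cons w t ih =>
      rw [PySem.List.enumerate_cons, List.filter_cons]
      have hlen : k + ((w :: t).length : Int) = (k + 1) + t.length := by simp; ring
      by_cases hw : pvMark w
      · simp only [hw, if_true]
        rw [List.drop_one, List.tail_cons, hlen]
        cases hM : (PySem.List.enumerate t (k+1)).filter (fun p => pvMark p.2) with
        | nil =>
            have htw : t.takeWhile (fun x => !pvMark x) = t := pvNoMark t (k+1) hM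
            have hdw : t.dropWhile (fun x => !pvMark x) = [] := by
              have := List.takeWhile_append_dropWhile (p := fun x => !pvMark x) (l := t)
              rw [htw] at this
              have hl := congrArg List.length this
              simp at hl
              rw [List.dropWhile_eq_nil_iff]
              intro x hx
              simp [hl x hx]
            conv_rhs => rw [pvSegs.eq_def]
            simp only [hw, if_true, htw, hdw]
            rw [pvSegs.eq_def]
            simp only [List.map_nil, List.zip_cons_cons, List.zip_nil_left, List.nil_append,
              List.map_cons, List.map_nil]
            congr 2
            rw [pvSliceCons w t _ _ (by omega) (by omega)]
            have h0 : k + 1 - k - 1 = (0 : Int) := by ring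
            rw [h0, PySem.List.slice_zero_start, PySem.List.slice_to _ _]
            have : (k + 1 + (t.length : Int) - k - 1).toNat = t.length := by omega
            rw [this, List.take_of_length_le (le_refl _)]
            omega
        | cons m ms =>
            simp only [List.map_cons, List.cons_append, List.zip_cons_cons, List.map_cons]
            have hge : k + 1 ≤ m.1 := pvGE t (k+1) m (by rw [hM]; exact List.mem_cons_self ..)
            conv_rhs => rw [pvSegs.eq_def]
            simp only [hw, if_true]
            congr 1
            · -- head segment
              congr 1
              rw [pvSliceCons w t _ _ (by omega) (by omega)]
              have h0 : k + 1 - k - 1 = (0 : Int) := by ring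
              rw [h0, PySem.List.slice_zero_start, PySem.List.slice_to _ _]
              have := pvFirst t (k+1)
              rw [hM] at this
              simp only [List.headD_cons] at this
              have harg : (m.1 - k - 1).toNat = (m.1 - (k+1)).toNat := by omega
              rw [harg, this]
              omega
            · -- tail segments
              have hb : ∀ e ∈ (ms.map (·.1) ++ [(k+1) + (t.length : Int)]), k + 1 ≤ e := by
                intro e he
                apply pvBoundsGE t k e
                rw [hM, List.drop_one, List.tail_cons]
                exact he
              have hsh := pvShift t w k (ms.map (·.1) ++ [(k+1) + (t.length : Int)]) hb
              rw [hM] at hsh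
              rw [hsh]
              have := ih (k+1) (by omega)
              rw [hM, List.drop_one, List.tail_cons] at this
              rw [this, pvSegs_dropWhile]
      · simp only [hw, Bool.false_eq_true, if_neg, not_false_iff]
        rw [hlen]
        have hb : ∀ e ∈ ((((PySem.List.enumerate t (k+1)).filter (fun p => pvMark p.2)).drop 1).map (·.1)
              ++ [(k+1) + (t.length : Int)]), k + 1 ≤ e := pvBoundsGE t k
        rw [pvShift t w k _ hb, ih (k+1) (by omega)]
        conv_rhs => rw [pvSegs.eq_def]
        simp [hw]

theorem pvA_eq (s : String) : parse_hyphon_name_value s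
    = (pvFinA ((PySem.Str.split₀ s).foldl pvStepA (none, [], PySem.Dict.empty))).items := rfl

-- ===== VERDICT (by name: the statement is the Claim_ definition above) =====
theorem parse_hyphon_name_value_spec : Claim_equal_parse_hyphon_name_value := by
  intro s _
  unfold Spec_parse_hyphon_name_value
  rw [pvA_eq, pvLA1]
  unfold parse_hyphon_name_value_alt
  congr 1
  have hB := pvLB (PySem.Str.split₀ s) 0 (by omega)
  simp only [sub_zero, zero_add] at hB
  rw [← hB, List.foldl_map]
  rfl
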